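-- pv_equiv track=rewrite | github.com/Mcheung7272/UAlbany-Course-Bot | courseLookup.py | allInfo
-- ===== SOURCE A (Python) =====
-- def allInfo(group):
--     classNum = []
--     courseInfo = []
--     meetingInfo = []
--     seats = []
--     comments = []
--
--     for i in group:
--         if("Class Number:" in i):
--             sliced = i[14:]
--             classNum.append(sliced)
--         elif("Course Info:" in i):
--             sliced = i[13:]
--             courseInfo.append(sliced)
--         elif("Meeting Info:" in i):
--             sliced = i[14:]
--             meetingInfo.append(sliced)
--         elif("Seats" in i):
--             seats.append(i)
--         elif("Comments:" in i):
--             sliced = i[10:]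
--             comments.append(sliced)
--
--     return list(classNum), list(courseInfo), list(meetingInfo), list(seats), list(comments)
-- ===== SOURCE B (Python) =====
-- def allInfo(group):
--     classNum = [i[14:] for i in group if "Class Number:" in i]
--     courseInfo = [i[13:] for i in group
--                   if "Course Info:" in i and "Class Number:" not in i]
--     meetingInfo = [i[14:] for i in group
--                    if "Meeting Info:" in i and "Course Info:" not in i
--                    and "Class Number:" not in i]
--     seats = [i for i in group
--              if "Seats" in i and "Meeting Info:" not in i
--              and "Course Info:" not in i and "Class Number:" not in i]
--     comments = [i[10:] for i in group
--                 if "Comments:" in i and "Seats" not in i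
--                 and "Meeting Info:" not in i and "Course Info:" not in i
--                 and "Class Number:" not in i]
--     return classNum, courseInfo, meetingInfo, seats, comments
-- ===== Notes on version B (the rewrite author's own statement) =====
-- stated objective: idiomatic
-- what changed: Replaces the single accumulate-into-five-lists elif loop by five independent comprehensions, one per category, each with an explicit guard excluding the higher-priority substrings.
import Mathlib
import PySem

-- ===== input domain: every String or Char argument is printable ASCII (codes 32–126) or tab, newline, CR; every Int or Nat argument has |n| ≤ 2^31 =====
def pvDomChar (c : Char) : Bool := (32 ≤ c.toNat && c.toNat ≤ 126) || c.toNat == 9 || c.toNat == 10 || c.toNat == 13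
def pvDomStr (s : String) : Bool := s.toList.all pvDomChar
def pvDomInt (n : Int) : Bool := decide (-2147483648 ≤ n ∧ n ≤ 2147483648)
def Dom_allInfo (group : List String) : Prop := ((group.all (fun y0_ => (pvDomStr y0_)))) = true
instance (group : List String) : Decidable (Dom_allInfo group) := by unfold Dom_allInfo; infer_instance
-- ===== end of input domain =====

-- ===== PORT A =====
-- one honest line: B categorizes with five independent comprehensions (priority guards explicit) instead of A's single elif-chain loop; same return value, idiomatic restatement.
def allInfoLoop (group : List String)
    (classNum courseInfo meetingInfo seats comments : List String) :
    List String × List String × List String × List String × List String :=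
  match group with
  | [] => (classNum, courseInfo, meetingInfo, seats, comments)
  | i :: rest =>
    if PySem.Str.isIn "Class Number:" i then
      allInfoLoop rest (classNum ++ [PySem.Str.slice i (some 14) none]) courseInfo meetingInfo seats comments
    else if PySem.Str.isIn "Course Info:" i then
      allInfoLoop rest classNum (courseInfo ++ [PySem.Str.slice i (some 13) none]) meetingInfo seats comments
    else if PySem.Str.isIn "Meeting Info:" i then
      allInfoLoop rest classNum courseInfo (meetingInfo ++ [PySem.Str.slice i (some 14) none]) seats comments
    else if PySem.Str.isIn "Seats" i then
      allInfoLoop rest classNum courseInfo meetingInfo (seats ++ [i]) comments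
    else if PySem.Str.isIn "Comments:" i then
      allInfoLoop rest classNum courseInfo meetingInfo seats (comments ++ [PySem.Str.slice i (some 10) none])
    else
      allInfoLoop rest classNum courseInfo meetingInfo seats comments

def allInfo (group : List String) : List String × List String × List String × List String × List String :=
  allInfoLoop group [] [] [] [] []

-- ===== PORT B =====
def allInfo_alt (group : List String) : List String × List String × List String × List String × List String :=
  ((group.filter (fun i => PySem.Str.isIn "Class Number:" i)).map
      (fun i => PySem.Str.slice i (some 14) none),
   (group.filter (fun i => PySem.Str.isIn "Course Info:" i && !PySem.Str.isIn "Class Number:" i)).map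
      (fun i => PySem.Str.slice i (some 13) none),
   (group.filter (fun i => PySem.Str.isIn "Meeting Info:" i && !PySem.Str.isIn "Course Info:" i
      && !PySem.Str.isIn "Class Number:" i)).map
      (fun i => PySem.Str.slice i (some 14) none),
   group.filter (fun i => PySem.Str.isIn "Seats" i && !PySem.Str.isIn "Meeting Info:" i
      && !PySem.Str.isIn "Course Info:" i && !PySem.Str.isIn "Class Number:" i),
   (group.filter (fun i => PySem.Str.isIn "Comments:" i && !PySem.Str.isIn "Seats" i
      && !PySem.Str.isIn "Meeting Info:" i && !PySem.Str.isIn "Course Info:" i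
      && !PySem.Str.isIn "Class Number:" i)).map
      (fun i => PySem.Str.slice i (some 10) none))

-- ===== PRECONDITION & SPEC =====
def Spec_allInfo (group : List String) (out : List String × List String × List String × List String × List String) : Prop := out = allInfo_alt group
instance (group : List String) (out : List String × List String × List String × List String × List String) : Decidable (Spec_allInfo group out) := by unfold Spec_allInfo; infer_instance

-- ===== CLAIM (what is proved, stated in full; the proofs are below) =====
def Claim_equal_allInfo : Prop := ∀ (group : List String), Dom_allInfo group → Spec_allInfo group (allInfo group)

-- ===== LEMMAS AND PROOFS =====
theorem allInfoLoop_eq (group : List String)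
    (c1 c2 c3 c4 c5 : List String) :
    allInfoLoop group c1 c2 c3 c4 c5 =
      (c1 ++ (allInfo_alt group).1, c2 ++ (allInfo_alt group).2.1,
       c3 ++ (allInfo_alt group).2.2.1, c4 ++ (allInfo_alt group).2.2.2.1,
       c5 ++ (allInfo_alt group).2.2.2.2) := by
  induction group generalizing c1 c2 c3 c4 c5 with
  | nil => simp [allInfoLoop, allInfo_alt]
  | cons i rest ih =>
    by_cases h1 : PySem.Str.isIn "Class Number:" i = true <;>
      by_cases h2 : PySem.Str.isIn "Course Info:" i = true <;>
      by_cases h3 : PySem.Str.isIn "Meeting Info:" i = true <;>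
      by_cases h4 : PySem.Str.isIn "Seats" i = true <;>
      by_cases h5 : PySem.Str.isIn "Comments:" i = true <;>
      simp at h1 h2 h3 h4 h5 <;>
      simp [allInfoLoop, allInfo_alt, h1, h2, h3, h4, h5, ih]

-- ===== VERDICT (by name: the statement is the Claim_ definition above) =====
theorem allInfo_spec : Claim_equal_allInfo := by
  intro group _
  unfold Spec_allInfo allInfo
  rw [allInfoLoop_eq]
  simp
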